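-- pv_equiv track=rewrite | github.com/JasonZuu/MedCoE-private | vocab/vocab_modify_tpe.py | get_all_merge_paths
-- ===== SOURCE A (Python) =====
-- from typing import Optional, Dict, List, Tuple
-- from typing import Dict, Tuple, List
--
-- def get_all_merge_paths(subtokens: List[str]) -> List[List[Tuple[str, str]]]:
--     """
--     Enumerate all full merge paths for a list of subtokens.
--
--     Args:
--         subtokens: List of subtokens, e.g. ["a", "b", "c", "d"]
--
--     Returns:
--         A list of merge-sequences. Each merge-sequence is a list of tuples,
--         where each tuple is (left, right) tokens that were merged at that step.
--         The sequence has length len(subtokens) - 1.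
--     """
--     # 递归基：只有一个 token 时，不用 merge，返回包含一个空路径的列表
--     if len(subtokens) <= 1:
--         return [[]]
--
--     all_merge_paths = []
--
--     # 对每一个可能的相邻位置 i，进行一次 merge
--     for i in range(len(subtokens) - 1):
--         left = subtokens[i]
--         right = subtokens[i + 1]
--         merged = left + right
--
--         # 构造下一层的 token 列表
--         next_tokens = (
--             subtokens[:i] +         # 左侧不变部分
--             [merged] +              # 放入新合并的 token
--             subtokens[i + 2:]       # 右侧不变部分
--         )
--
--         # 递归获取剩余的 merge-paths
--         for suffix_path in get_all_merge_paths(next_tokens):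
--             # 把当前这一步 (left,right) prepend 到后续路径上
--             all_merge_paths.append([(left, right)] + suffix_path)
--
--     return all_merge_paths
-- ===== SOURCE B (Python) =====
-- def get_all_merge_paths(subtokens):
--     """Iterative enumeration: decode each path index in factorial (mixed-radix)
--     base into a merge-choice vector, then simulate the merges on a copy."""
--     n = len(subtokens)
--     m = n - 1 if n > 0 else 0
--     total = 1
--     for k in range(1, m + 1):
--         total *= k
--     result = []
--     for idx in range(total):
--         f = total
--         rem = idx
--         digits = []
--         for k in range(m, 0, -1):
--             f //= k
--             digits.append(rem // f)
--             rem %= f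
--         tokens = list(subtokens)
--         path = []
--         for c in digits:
--             left = tokens[c]
--             right = tokens[c + 1]
--             tokens[c:c + 2] = [left + right]
--             path.append((left, right))
--         result.append(path)
--     return result
-- ===== Notes on version B (the rewrite author's own statement) =====
-- stated objective: alternative
-- what changed: Replaces A's branching recursion over token lists by a flat iterative enumeration: each path index 0..(n-1)!-1 is decoded in factorial (mixed-radix) base into a merge-choice vector, which is then simulated once on a copy of the tokens.
import Mathlib
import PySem

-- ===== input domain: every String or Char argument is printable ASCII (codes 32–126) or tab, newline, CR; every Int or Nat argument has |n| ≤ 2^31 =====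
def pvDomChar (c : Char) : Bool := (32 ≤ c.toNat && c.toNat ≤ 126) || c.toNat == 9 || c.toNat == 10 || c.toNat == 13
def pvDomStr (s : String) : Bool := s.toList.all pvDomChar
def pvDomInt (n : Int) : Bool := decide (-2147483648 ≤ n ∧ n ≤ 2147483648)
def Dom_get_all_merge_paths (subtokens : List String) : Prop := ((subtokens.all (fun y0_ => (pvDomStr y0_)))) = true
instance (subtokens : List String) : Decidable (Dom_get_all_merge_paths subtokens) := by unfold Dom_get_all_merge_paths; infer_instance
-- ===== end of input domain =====

-- ===== PORT A =====
-- B re-implements A by decoding path indices in factorial base and simulating the merges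
-- iteratively (objective: alternative decomposition; same enumeration order).
-- Port of A's recursion; the nested for-loops appending to the accumulator become flatMap/map.
-- subtokens[i] / subtokens[i+1] are always in range here (i < len-1), so getD is exact.
def get_all_merge_paths (subtokens : List String) : List (List (String × String)) :=
  if subtokens.length ≤ 1 then [[]]
  else
    (List.range (subtokens.length - 1)).attach.flatMap (fun ⟨i, hi⟩ =>
      let left := subtokens.getD i ""
      let right := subtokens.getD (i + 1) ""
      let next := subtokens.take i ++ [left ++ right] ++ subtokens.drop (i + 2)
      (get_all_merge_paths next).map (fun suffix_path => (left, right) :: suffix_path))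
termination_by subtokens.length
decreasing_by
  simp only [List.mem_range] at hi
  simp only [List.length_append, List.length_take, List.length_drop, List.length_cons,
    List.length_nil]
  omega

-- ===== PORT B =====
-- the inner "for k in range(m, 0, -1): f //= k; digits.append(rem // f); rem %= f" loop
def pv_decode : Nat → Nat → Nat → List Nat
  | 0, _, _ => []
  | k + 1, f, rem =>
    let f' := f / (k + 1)
    (rem / f') :: pv_decode k f' (rem % f')

-- the "for c in digits: …" merge-simulation loop (tokens[c] always in range, so getD is exact)
def pv_simulate : List String → List Nat → List (String × String)
  | _, [] => []
  | tokens, c :: cs =>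
    let left := tokens.getD c ""
    let right := tokens.getD (c + 1) ""
    (left, right) :: pv_simulate (tokens.take c ++ [left ++ right] ++ tokens.drop (c + 2)) cs

def get_all_merge_paths_alt (subtokens : List String) : List (List (String × String)) :=
  let n := subtokens.length
  let m := n - 1              -- Python: m = n - 1 if n > 0 else 0 (Nat subtraction matches)
  let total := (List.range' 1 m).foldl (· * ·) 1   -- for k in range(1, m+1): total *= k
  (List.range total).map (fun idx => pv_simulate subtokens (pv_decode m total idx))

-- ===== PRECONDITION & SPEC =====
def Spec_get_all_merge_paths (subtokens : List String) (out : List (List (String × String))) : Prop := out = get_all_merge_paths_alt subtokens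
instance (subtokens : List String) (out : List (List (String × String))) : Decidable (Spec_get_all_merge_paths subtokens out) := by unfold Spec_get_all_merge_paths; infer_instance

-- ===== CLAIM (what is proved, stated in full; the proofs are below) =====
def Claim_equal_get_all_merge_paths : Prop := ∀ (subtokens : List String), Dom_get_all_merge_paths subtokens → Spec_get_all_merge_paths subtokens (get_all_merge_paths subtokens)

-- ===== LEMMAS AND PROOFS =====

lemma foldl_range'_fact (m : Nat) : (List.range' 1 m).foldl (· * ·) 1 = m.factorial := by
  induction m with
  | zero => rfl
  | succ m ih =>
    rw [List.range'_1_concat, List.foldl_append, ih]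
    simp only [List.foldl_cons, List.foldl_nil, Nat.factorial_succ]
    ring

lemma pv_decode_fact (k rem : Nat) :
    pv_decode (k + 1) (k + 1).factorial rem
      = (rem / k.factorial) :: pv_decode k k.factorial (rem % k.factorial) := by
  simp [pv_decode, Nat.factorial_succ, Nat.mul_div_cancel_left _ (Nat.succ_pos k)]

lemma range_mul_map {α : Type} (a b : Nat) (f : Nat → α) :
    (List.range (a * b)).map f
      = (List.range a).flatMap (fun q => (List.range b).map (fun r => f (q * b + r))) := by
  induction a with
  | zero => simp
  | succ a ih =>
    rw [Nat.succ_mul, List.range_add, List.range_succ, List.map_append, ih,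
      List.flatMap_append]
    simp [List.map_map, Function.comp_def]

lemma A_unfold (toks : List String) (h : ¬ toks.length ≤ 1) :
    get_all_merge_paths toks
      = (List.range (toks.length - 1)).flatMap (fun i =>
          (get_all_merge_paths
              (toks.take i ++ [toks.getD i "" ++ toks.getD (i + 1) ""] ++
                toks.drop (i + 2))).map
            (fun suffix_path => (toks.getD i "", toks.getD (i + 1) "") :: suffix_path)) := by
  rw [get_all_merge_paths.eq_def, if_neg h]
  conv_rhs => rw [← List.attach_map_subtype_val (List.range (toks.length - 1))]
  rw [List.flatMap_map]

lemma main_lemma (m : Nat) : ∀ toks : List String, toks.length = m + 1 →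
    get_all_merge_paths toks
      = (List.range m.factorial).map (fun idx => pv_simulate toks (pv_decode m m.factorial idx)) := by
  induction m with
  | zero =>
    intro toks h
    rw [get_all_merge_paths.eq_def]
    simp [h, pv_decode, pv_simulate, List.range_one]
  | succ m ih =>
    intro toks h
    have hb : 0 < m.factorial := m.factorial_pos
    rw [A_unfold toks (by omega), Nat.factorial_succ, range_mul_map]
    have hlen : toks.length - 1 = m + 1 := by omega
    rw [hlen]
    refine List.flatMap_congr (fun i hi => ?_)
    rw [List.mem_range] at hi
    have hnext : (toks.take i ++ [toks.getD i "" ++ toks.getD (i + 1) ""] ++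
        toks.drop (i + 2)).length = m + 1 := by
      simp only [List.length_append, List.length_take, List.length_drop, List.length_cons,
        List.length_nil]
      omega
    rw [ih _ hnext, List.map_map]
    refine List.map_congr_left (fun r hr => ?_)
    rw [List.mem_range] at hr
    have hdiv : (i * m.factorial + r) / m.factorial = i := by
      rw [Nat.add_comm, Nat.add_mul_div_right _ _ hb, Nat.div_eq_of_lt hr]
      omega
    have hmod : (i * m.factorial + r) % m.factorial = r := by
      rw [Nat.add_comm, Nat.add_mul_mod_self_right, Nat.mod_eq_of_lt hr]
    rw [show (m + 1) * m.factorial = (m + 1).factorial from (Nat.factorial_succ m).symm,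
      pv_decode_fact, hdiv, hmod]
    simp [pv_simulate]

-- ===== VERDICT (by name: the statement is the Claim_ definition above) =====
theorem get_all_merge_paths_spec : Claim_equal_get_all_merge_paths := by
  intro toks _
  unfold Spec_get_all_merge_paths get_all_merge_paths_alt
  simp only [foldl_range'_fact]
  cases h : toks with
  | nil =>
    rw [get_all_merge_paths.eq_def]
    simp [pv_simulate, pv_decode, List.range_one]
  | cons x xs =>
    have := main_lemma xs.length toks (by simp [h])
    simpa [h] using this
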